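-- pv_equiv track=rewrite | github.com/OpenMOSS/Language-Model-SAEs | src/path_evaluation/feature_infl.py | _build_target_groups_within_feature_list
-- ===== SOURCE A (Python) =====
-- from typing import Any, Dict, List, Optional, Tuple
--
-- FeatureNode = Tuple[int, int, int, str]
--
-- def _feature_type_order(feature_type: str) -> int:
--     feature_type_lower = feature_type.lower()
--     if feature_type_lower == "lorsa":
--         return 0
--     if feature_type_lower == "transcoder":
--         return 1
--     raise ValueError(f"Unknown feature_type: {feature_type}")
--
-- def _feature_sort_key(node: FeatureNode) -> Tuple[int, int, int, int]:
--     layer, pos, feature_id, feature_type = node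
--     return (layer, _feature_type_order(feature_type), pos, feature_id)
--
-- def _is_valid_causal_edge(source_node: FeatureNode, target_node: FeatureNode) -> bool:
--     if source_node == target_node:
--         return False
--
--     source_layer, _, _, source_type = source_node
--     target_layer, _, _, target_type = target_node
--
--     if source_layer < target_layer:
--         return True
--
--     if source_layer == target_layer:
--         return source_type.lower() == "lorsa" and target_type.lower() == "transcoder"
--
--     return False
--
-- def _build_target_groups_within_feature_list(
--     feature_list: List[FeatureNode],
-- ) -> List[Tuple[FeatureNode, List[FeatureNode]]]:
--     ordered_features = sorted(set(feature_list), key=_feature_sort_key)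
--     grouped_targets: List[Tuple[FeatureNode, List[FeatureNode]]] = []
--     for i, source_node in enumerate(ordered_features):
--         target_nodes = [
--             target_node
--             for target_node in ordered_features[i + 1 :]
--             if _is_valid_causal_edge(source_node, target_node)
--         ]
--         if target_nodes:
--             grouped_targets.append((source_node, target_nodes))
--     return grouped_targets
-- ===== SOURCE B (Python) =====
-- from typing import List, Tuple
--
-- FeatureNode = Tuple[int, int, int, str]
--
-- def _feature_type_order(feature_type: str) -> int:
--     feature_type_lower = feature_type.lower()
--     if feature_type_lower == "lorsa":
--         return 0
--     if feature_type_lower == "transcoder":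
--         return 1
--     raise ValueError(f"Unknown feature_type: {feature_type}")
--
-- def _feature_sort_key(node: FeatureNode) -> Tuple[int, int, int, int]:
--     layer, pos, feature_id, feature_type = node
--     return (layer, _feature_type_order(feature_type), pos, feature_id)
--
-- def _group_key(node: FeatureNode) -> Tuple[int, int]:
--     return (node[0], _feature_type_order(node[3]))
--
-- def _build_target_groups_within_feature_list(
--     feature_list: List[FeatureNode],
-- ) -> List[Tuple[FeatureNode, List[FeatureNode]]]:
--     # Single grouping pass: after sorting, the valid targets of every source are
--     # exactly the contiguous tail that starts right after the source's
--     # (layer, type) group, so no per-pair edge test is needed.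
--     ordered_features = sorted(set(feature_list), key=_feature_sort_key)
--     grouped_targets: List[Tuple[FeatureNode, List[FeatureNode]]] = []
--     run: List[FeatureNode] = []
--     n = len(ordered_features)
--     for i, node in enumerate(ordered_features):
--         run.append(node)
--         if i + 1 == n or _group_key(ordered_features[i + 1]) != _group_key(node):
--             targets = ordered_features[i + 1:]
--             if targets:
--                 grouped_targets.extend((source, targets) for source in run)
--             run = []
--     return grouped_targets
-- ===== Notes on version B (the rewrite author's own statement) =====
-- stated objective: faster
-- what changed: Instead of testing _is_valid_causal_edge on every later node for every source (quadratic in tests), B makes one grouping pass over the sorted deduplicated list: nodes sharing a (layer, type-order) key form a contiguous run whose valid targets are exactly the tail that starts right after the run, so each source's target list is a single shared tail slice.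
-- outside the precondition, e.g. on _build_target_groups_within_feature_list([(0, 0, 0, 'transcoder'), (0, 0, 0, 'TRANSCODER')]): A returns [], B returns []
import Mathlib
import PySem

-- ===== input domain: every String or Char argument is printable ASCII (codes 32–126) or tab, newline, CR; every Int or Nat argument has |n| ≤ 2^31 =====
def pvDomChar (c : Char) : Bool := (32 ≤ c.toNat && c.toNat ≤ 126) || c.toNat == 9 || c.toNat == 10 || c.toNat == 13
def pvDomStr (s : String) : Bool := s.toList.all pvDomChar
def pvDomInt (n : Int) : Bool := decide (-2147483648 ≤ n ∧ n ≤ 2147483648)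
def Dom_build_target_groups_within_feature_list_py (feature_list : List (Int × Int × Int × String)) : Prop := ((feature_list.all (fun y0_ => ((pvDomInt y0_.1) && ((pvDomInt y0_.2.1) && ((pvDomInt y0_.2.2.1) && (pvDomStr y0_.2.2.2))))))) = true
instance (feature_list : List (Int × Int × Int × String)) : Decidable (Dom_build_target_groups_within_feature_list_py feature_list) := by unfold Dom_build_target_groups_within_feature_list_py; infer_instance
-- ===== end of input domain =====

-- B replaces A's per-pair _is_valid_causal_edge filter over every suffix by one grouping
-- pass over the sorted list, pairing each (layer, type)-run with the tail after it.

-- ===== PORT A =====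
-- _feature_type_order; the final `2` stands for Python's `raise ValueError` branch,
-- which Pre_ excludes.
def feature_type_order (feature_type : String) : Int :=
  if PySem.Str.lower feature_type == "lorsa" then 0
  else if PySem.Str.lower feature_type == "transcoder" then 1
  else 2

-- _feature_sort_key returns the 4-tuple (layer, type_order, pos, feature_id); Python's
-- sorted compares such tuples lexicographically, which is the ×ₗ (Prod.Lex) order on the
-- split key (layer, type_order) ×ₗ (pos, feature_id) used through PySem.List.sorted2.
def sortKey1 (n : Int × Int × Int × String) : Int ×ₗ Int := toLex (n.1, feature_type_order n.2.2.2)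
def sortKey2 (n : Int × Int × Int × String) : Int ×ₗ Int := toLex (n.2.1, n.2.2.1)

-- sorted(set(feature_list), key=_feature_sort_key), shared by both sources verbatim
def orderedFeatures (feature_list : List (Int × Int × Int × String)) : List (Int × Int × Int × String) :=
  PySem.List.sorted2 (PySem.Set.ofList feature_list) sortKey1 sortKey2

def is_valid_causal_edge (s t : Int × Int × Int × String) : Bool :=
  if s == t then false
  else if s.1 < t.1 then true
  else if s.1 == t.1 then
    PySem.Str.lower s.2.2.2 == "lorsa" && PySem.Str.lower t.2.2.2 == "transcoder"
  else false

-- the for-loop: at index i the remaining list IS ordered_features[i+1:]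
def aLoop : List (Int × Int × Int × String) → List ((Int × Int × Int × String) × (List (Int × Int × Int × String))) → List ((Int × Int × Int × String) × (List (Int × Int × Int × String)))
  | [], out => out
  | s :: rest, out =>
      let targets := rest.filter (fun t => is_valid_causal_edge s t)
      aLoop rest (if targets.isEmpty then out else out ++ [(s, targets)])

def build_target_groups_within_feature_list_py (feature_list : List (Int × Int × Int × String)) : List ((Int × Int × Int × String) × (List (Int × Int × Int × String))) :=
  aLoop (orderedFeatures feature_list) []

-- ===== PORT B =====
-- _group_key (only compared for equality, so a plain pair)
def groupKey (n : Int × Int × Int × String) : Int × Int := (n.1, feature_type_order n.2.2.2)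

-- B's single grouping pass; `rest` is ordered_features[i+1:], so `i+1 == n` is `rest = []`
-- and `ordered_features[i+1]` is the head of `rest`.
def bLoop : List (Int × Int × Int × String) → List (Int × Int × Int × String) → List ((Int × Int × Int × String) × (List (Int × Int × Int × String))) → List ((Int × Int × Int × String) × (List (Int × Int × Int × String)))
  | _, [], out => out
  | run, node :: rest, out =>
      match rest with
      | [] => out  -- boundary at the end: targets = [] so nothing is emitted
      | next :: _ =>
          if groupKey next ≠ groupKey node then
            bLoop [] rest (out ++ (run ++ [node]).map (fun s => (s, rest)))
          else
            bLoop (run ++ [node]) rest out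

def build_target_groups_within_feature_list_py_alt (feature_list : List (Int × Int × Int × String)) : List ((Int × Int × Int × String) × (List (Int × Int × Int × String))) :=
  bLoop [] (orderedFeatures feature_list) []

-- ===== PRECONDITION & SPEC =====
-- Pre_ excludes (1) nodes whose feature_type is not a case variant of "lorsa"/"transcoder"
-- (A raises ValueError while sorting), and (2) lists holding two distinct nodes with the
-- same sort key (equal ints, same lowercased type, different type spelling): there A's
-- output order is an accident of set() hash iteration order and varies with PYTHONHASHSEED.
def Pre_build_target_groups_within_feature_list_py (feature_list : List (Int × Int × Int × String)) : Prop :=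
  ∀ a ∈ feature_list,
    (PySem.Str.lower a.2.2.2 = "lorsa" ∨ PySem.Str.lower a.2.2.2 = "transcoder") ∧
    ∀ b ∈ feature_list,
      a.1 = b.1 → a.2.1 = b.2.1 → a.2.2.1 = b.2.2.1 →
      PySem.Str.lower a.2.2.2 = PySem.Str.lower b.2.2.2 → a = b
instance (feature_list : List (Int × Int × Int × String)) : Decidable (Pre_build_target_groups_within_feature_list_py feature_list) := by unfold Pre_build_target_groups_within_feature_list_py; infer_instance

def pvWitness_build_target_groups_within_feature_list_py : (List (Int × Int × Int × String)) :=
  [(0, 0, 0, "lorsa"), (0, 1, 2, "transcoder"), (1, 0, 3, "Transcoder"), (0, 5, 1, "lorsa")]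

def Spec_build_target_groups_within_feature_list_py (feature_list : List (Int × Int × Int × String)) (out : List ((Int × Int × Int × String) × (List (Int × Int × Int × String)))) : Prop := out = build_target_groups_within_feature_list_py_alt feature_list
instance (feature_list : List (Int × Int × Int × String)) (out : List ((Int × Int × Int × String) × (List (Int × Int × Int × String)))) : Decidable (Spec_build_target_groups_within_feature_list_py feature_list out) := by unfold Spec_build_target_groups_within_feature_list_py; infer_instance

-- ===== CLAIM (what is proved, stated in full; the proofs are below) =====
def Claim_equal_build_target_groups_within_feature_list_py : Prop := ∀ (feature_list : List (Int × Int × Int × String)), Dom_build_target_groups_within_feature_list_py feature_list → Pre_build_target_groups_within_feature_list_py feature_list → Spec_build_target_groups_within_feature_list_py feature_list (build_target_groups_within_feature_list_py feature_list)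

-- ===== LEMMAS AND PROOFS =====

-- the lexicographic key Python's sorted compares: ((layer, type_order), (pos, feature_id))
def bigKey (n : Int × Int × Int × String) : (Int ×ₗ Int) ×ₗ (Int ×ₗ Int) := toLex (sortKey1 n, sortKey2 n)

-- known feature type (A's _feature_type_order does not raise)
def KnownType (n : Int × Int × Int × String) : Prop :=
  PySem.Str.lower n.2.2.2 = "lorsa" ∨ PySem.Str.lower n.2.2.2 = "transcoder"

-- sorted2's comparison is exactly `bigKey · < bigKey ·`
lemma sorted2_before_eq (a b : Int × Int × Int × String) :
    (decide (sortKey1 a < sortKey1 b) || (!decide (sortKey1 b < sortKey1 a) && decide (sortKey2 a < sortKey2 b)))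
      = decide (bigKey a < bigKey b) := by
  have hiff : bigKey a < bigKey b ↔
      sortKey1 a < sortKey1 b ∨ (sortKey1 a = sortKey1 b ∧ sortKey2 a < sortKey2 b) := by
    unfold bigKey; exact Prod.Lex.toLex_lt_toLex
  rcases lt_trichotomy (sortKey1 a) (sortKey1 b) with h | h | h
  · simp [hiff, h]
  · simp [hiff, h]
  · simp [hiff, h, h.ne', not_lt_of_gt h]

lemma foldl_insertBy_pairwise {α κ : Type} [LinearOrder κ] (key : α → κ) (before : α → α → Bool)
    (h : ∀ a b, before a b = decide (key a < key b)) :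
    ∀ (xs acc : List α), acc.Pairwise (fun a b => key a ≤ key b) →
      (xs.foldl (fun acc x => PySem.List.insertBy before x acc) acc).Pairwise (fun a b => key a ≤ key b) := by
  intro xs
  induction xs with
  | nil => intro acc hacc; exact hacc
  | cons x xs ih =>
      intro acc hacc
      refine ih _ ?_
      have hb : before = fun a b => decide (key a < key b) := funext fun a => funext fun b => h a b
      rw [hb]
      exact PySem.List.insertBy_pairwise_le key x acc hacc

lemma ordered_pairwise (feature_list : List (Int × Int × Int × String)) :
    (orderedFeatures feature_list).Pairwise (fun a b => sortKey1 a ≤ sortKey1 b) := by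
  have h : (orderedFeatures feature_list).Pairwise (fun a b => bigKey a ≤ bigKey b) := by
    unfold orderedFeatures PySem.List.sorted2
    exact foldl_insertBy_pairwise bigKey _ sorted2_before_eq _ [] (List.Pairwise.nil)
  refine h.imp ?_
  intro a b hab
  rcases (Prod.Lex.le_iff).1 hab with h1 | ⟨h1, _⟩
  · exact le_of_lt h1
  · exact le_of_eq h1

lemma ordered_mem {feature_list : List (Int × Int × Int × String)} {n : Int × Int × Int × String}
    (h : n ∈ orderedFeatures feature_list) : n ∈ feature_list := by
  have hp := PySem.List.sorted2_perm (PySem.Set.ofList feature_list) sortKey1 sortKey2 false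
  exact (PySem.Set.mem_ofList feature_list n).1 (hp.mem_iff.1 h)

-- groupKey and sortKey1 name the same pair (sortKey1 just wears the Lex order)
lemma sortKey1_eq_iff (a b : Int × Int × Int × String) :
    sortKey1 a = sortKey1 b ↔ groupKey a = groupKey b := Iff.rfl

-- on known types the edge test is exactly "strictly larger (layer, type_order) key"
lemma valid_iff_lt (s t : Int × Int × Int × String) (hs : KnownType s) (ht : KnownType t) :
    is_valid_causal_edge s t = decide (sortKey1 s < sortKey1 t) := by
  have hlt1 : sortKey1 s < sortKey1 t ↔
      s.1 < t.1 ∨ (s.1 = t.1 ∧ feature_type_order s.2.2.2 < feature_type_order t.2.2.2) := by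
    unfold sortKey1; exact Prod.Lex.toLex_lt_toLex
  unfold is_valid_causal_edge
  by_cases hst : s = t
  · subst hst; simp
  · simp only [beq_iff_eq, hst, if_false]
    rcases lt_trichotomy s.1 t.1 with h | h | h
    · simp [h, hlt1.2 (Or.inl h)]
    · have horder : (feature_type_order s.2.2.2 < feature_type_order t.2.2.2) ↔
          (PySem.Str.lower s.2.2.2 = "lorsa" ∧ PySem.Str.lower t.2.2.2 = "transcoder") := by
        unfold feature_type_order
        rcases hs with hs | hs <;> rcases ht with ht | ht <;> simp [hs, ht]
      have hlt : sortKey1 s < sortKey1 t ↔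
          (PySem.Str.lower s.2.2.2 = "lorsa" ∧ PySem.Str.lower t.2.2.2 = "transcoder") := by
        rw [hlt1]
        constructor
        · rintro (hlt | ⟨_, h2⟩)
          · omega
          · exact horder.1 h2
        · intro hx; exact Or.inr ⟨h, horder.2 hx⟩
      simp only [h, lt_irrefl, if_false, if_true]
      by_cases hx : PySem.Str.lower s.2.2.2 = "lorsa" ∧ PySem.Str.lower t.2.2.2 = "transcoder"
      · simp [hx.1, hx.2, hlt.2 hx]
      · have hn : ¬ sortKey1 s < sortKey1 t := fun hc => hx (hlt.1 hc)
        simp only [hn, decide_false]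
        rcases Decidable.not_and_iff_not_or_not.1 hx with hbad | hbad <;> simp [hbad]
    · have h1 : ¬ s.1 < t.1 := by omega
      have h2 : ¬ s.1 = t.1 := by omega
      have hn : ¬ sortKey1 s < sortKey1 t := by
        rw [hlt1]; rintro (hlt | ⟨heq, _⟩) <;> omega
      simp [h1, h2, hn]

-- the common shape both loops reduce to: each source is paired with the tail after its run
def specGo : List (Int × Int × Int × String) → List ((Int × Int × Int × String) × (List (Int × Int × Int × String)))
  | [] => []
  | s :: rest =>
      (let d := rest.dropWhile (fun t => groupKey t == groupKey s)
       if d.isEmpty then [] else [(s, d)]) ++ specGo rest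

lemma filter_valid_eq_dropWhile (s : Int × Int × Int × String) :
    ∀ rest : List (Int × Int × Int × String),
      (∀ t ∈ rest, sortKey1 s ≤ sortKey1 t) →
      rest.Pairwise (fun a b => sortKey1 a ≤ sortKey1 b) →
      (∀ t ∈ rest, KnownType t) → KnownType s →
      rest.filter (fun t => is_valid_causal_edge s t)
        = rest.dropWhile (fun t => groupKey t == groupKey s) := by
  intro rest
  induction rest with
  | nil => intros; rfl
  | cons t rest ih =>
      intro hle hpw hk hks
      by_cases heq : groupKey t = groupKey s
      · have hkey : sortKey1 t = sortKey1 s := (sortKey1_eq_iff t s).2 heq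
        have hnv : is_valid_causal_edge s t = false := by
          rw [valid_iff_lt s t hks (hk t (by simp))]
          simp [hkey.symm]
        rw [List.filter_cons_of_neg (by simp [hnv]), List.dropWhile_cons_of_pos (by simp [heq])]
        exact ih (fun u hu => hle u (by simp [hu])) hpw.of_cons (fun u hu => hk u (by simp [hu])) hks
      · have hkey : sortKey1 s < sortKey1 t :=
          lt_of_le_of_ne (hle t (by simp)) (fun hc => heq ((sortKey1_eq_iff t s).1 hc.symm))
        have hv : is_valid_causal_edge s t = true := by
          rw [valid_iff_lt s t hks (hk t (by simp))]; simpa using hkey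
        rw [List.filter_cons_of_pos (by simp [hv]), List.dropWhile_cons_of_neg (by simp [heq])]
        congr 1
        apply List.filter_eq_self.2
        intro u hu
        have htu : sortKey1 t ≤ sortKey1 u := (List.pairwise_cons.1 hpw).1 u hu
        rw [valid_iff_lt s u hks (hk u (by simp [hu]))]
        simpa using lt_of_lt_of_le hkey htu

lemma aLoop_char :
    ∀ (l : List (Int × Int × Int × String)) out,
      l.Pairwise (fun a b => sortKey1 a ≤ sortKey1 b) → (∀ t ∈ l, KnownType t) →
      aLoop l out = out ++ specGo l := by
  intro l
  induction l with
  | nil => intro out _ _; simp [aLoop, specGo]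
  | cons s rest ih =>
      intro out hpw hk
      have hfilter := filter_valid_eq_dropWhile s rest (List.pairwise_cons.1 hpw).1
        hpw.of_cons (fun u hu => hk u (by simp [hu])) (hk s (by simp))
      simp only [aLoop, specGo, hfilter]
      rw [ih _ hpw.of_cons (fun u hu => hk u (by simp [hu]))]
      by_cases hd : (rest.dropWhile (fun t => groupKey t == groupKey s)).isEmpty
      · simp [hd]
      · simp [hd]

lemma bLoop_char :
    ∀ (rest : List (Int × Int × Int × String)) (node : Int × Int × Int × String) run out,
      (node :: rest).Pairwise (fun a b => sortKey1 a ≤ sortKey1 b) →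
      (∀ s ∈ run, groupKey s = groupKey node) →
      bLoop run (node :: rest) out
        = out ++ (let d := rest.dropWhile (fun t => groupKey t == groupKey node)
                  if d.isEmpty then [] else (run ++ [node]).map (fun s => (s, d))) ++ specGo rest := by
  intro rest
  induction rest with
  | nil => intro node run out _ _; simp [bLoop, specGo]
  | cons m rest' ih =>
      intro node run out hpw hrun
      by_cases heq : groupKey m = groupKey node
      · have hrun' : ∀ s ∈ run ++ [node], groupKey s = groupKey m := by
          intro s hs
          rcases List.mem_append.1 hs with hs | hs
          · rw [hrun s hs, heq]
          · simp at hs; rw [hs, heq]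
        have hstep : bLoop run (node :: m :: rest') out = bLoop (run ++ [node]) (m :: rest') out := by
          simp [bLoop, heq]
        have hpred : (fun t : Int × Int × Int × String => groupKey t == groupKey m)
            = (fun t => groupKey t == groupKey node) := by
          funext t; simp [heq]
        have hdw : List.dropWhile (fun t => groupKey t == groupKey node) (m :: rest')
            = List.dropWhile (fun t => groupKey t == groupKey node) rest' := by
          rw [List.dropWhile_cons]; simp [heq]
        rw [hstep, ih m (run ++ [node]) out hpw.of_cons hrun']
        simp only [specGo, hpred, hdw]
        by_cases hd : (List.dropWhile (fun t => groupKey t == groupKey node) rest').isEmpty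
        · simp [hd]
        · simp [hd, List.map_append, List.append_assoc]
      · have hstep : bLoop run (node :: m :: rest') out
            = bLoop [] (m :: rest') (out ++ (run ++ [node]).map (fun s => (s, m :: rest'))) := by
          simp [bLoop, heq]
        have hdw : List.dropWhile (fun t => groupKey t == groupKey node) (m :: rest') = m :: rest' := by
          rw [List.dropWhile_cons]; simp [heq]
        rw [hstep, ih m [] _ hpw.of_cons (by intro s hs; simp at hs)]
        simp only [specGo, hdw, List.isEmpty_cons]
        by_cases hd : (List.dropWhile (fun t => groupKey t == groupKey m) rest').isEmpty
        · simp [hd, List.append_assoc]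
        · simp [hd, List.append_assoc]

lemma bStart_eq_specGo (l : List (Int × Int × Int × String))
    (hpw : l.Pairwise (fun a b => sortKey1 a ≤ sortKey1 b)) :
    bLoop [] l [] = specGo l := by
  cases l with
  | nil => rfl
  | cons node rest =>
      rw [bLoop_char rest node [] [] hpw (by intro s hs; simp at hs)]
      simp only [specGo, List.nil_append, List.map_cons, List.map_nil]

-- ===== VERDICT (by name: the statement is the Claim_ definition above) =====
theorem build_target_groups_within_feature_list_py_spec : Claim_equal_build_target_groups_within_feature_list_py := by
  intro feature_list _ hpre
  unfold Spec_build_target_groups_within_feature_list_py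
  unfold build_target_groups_within_feature_list_py build_target_groups_within_feature_list_py_alt
  have hpw := ordered_pairwise feature_list
  have hk : ∀ t ∈ orderedFeatures feature_list, KnownType t :=
    fun t ht => (hpre t (ordered_mem ht)).1
  rw [aLoop_char _ [] hpw hk, bStart_eq_specGo _ hpw, List.nil_append]
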